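-- pv_equiv track=rewrite | github.com/kumashreeya/agents-pipeline | agents/test_agent.py | _clean_test_code
-- ===== SOURCE A (Python) =====
-- def _clean_test_code(test_code, function_name):
--     """Remove stray code that isn't imports or test functions."""
--     lines = test_code.split('\n')
--     clean = []
--     in_test_func = False
--
--     for line in lines:
--         stripped = line.strip()
--
--         # Always keep import lines
--         if stripped.startswith('import ') or stripped.startswith('from '):
--             clean.append(line)
--             in_test_func = False
--             continue
--
--         # Keep test function definitions and their bodies
--         if stripped.startswith('def test_'):
--             in_test_func = True
--             clean.append(line)
--             continue
--
--         if in_test_func: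
--             if stripped == '' or line.startswith(' ') or line.startswith('\t'):
--                 clean.append(line)
--             else:
--                 in_test_func = False
--                 # Check if this is another test or something else
--                 if stripped.startswith('def test_'):
--                     in_test_func = True
--                     clean.append(line)
--             continue
--
--         # Keep blank lines between functions
--         if stripped == '':
--             clean.append(line)
--
--     return '\n'.join(clean).strip()
-- ===== SOURCE B (Python) =====
-- def _clean_test_code(test_code, function_name):
--     """Remove stray code that isn't imports or test functions."""
--     lines = test_code.split('\n')
--     clean = []
--     i = 0
--     n = len(lines)
--     while i < n:
--         line = lines[i]
--         stripped = line.strip()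
--         if stripped.startswith('import ') or stripped.startswith('from '):
--             clean.append(line)
--             i += 1
--         elif stripped.startswith('def test_'):
--             clean.append(line)
--             i += 1
--             # consume the function body: blank or indented lines, stopping at
--             # the first import/from line or non-indented non-blank line
--             while i < n:
--                 body = lines[i]
--                 bs = body.strip()
--                 if bs.startswith('import ') or bs.startswith('from '):
--                     break
--                 if bs == '' or body.startswith(' ') or body.startswith('\t'):
--                     clean.append(body)
--                     i += 1
--                 else:
--                     break
--         elif stripped == '':
--             clean.append(line)
--             i += 1
--         else:
--             i += 1
--     return '\n'.join(clean).strip()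
-- ===== Notes on version B (the rewrite author's own statement) =====
-- stated objective: alternative
-- what changed: Replaces A's single flag-driven pass (in_test_func boolean carried across every line) by an index-driven outer dispatch loop with a nested inner while-loop that consumes a test function's body (blank or indented lines) and breaks without consuming on the first import/from or non-indented non-blank line.
import Mathlib
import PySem

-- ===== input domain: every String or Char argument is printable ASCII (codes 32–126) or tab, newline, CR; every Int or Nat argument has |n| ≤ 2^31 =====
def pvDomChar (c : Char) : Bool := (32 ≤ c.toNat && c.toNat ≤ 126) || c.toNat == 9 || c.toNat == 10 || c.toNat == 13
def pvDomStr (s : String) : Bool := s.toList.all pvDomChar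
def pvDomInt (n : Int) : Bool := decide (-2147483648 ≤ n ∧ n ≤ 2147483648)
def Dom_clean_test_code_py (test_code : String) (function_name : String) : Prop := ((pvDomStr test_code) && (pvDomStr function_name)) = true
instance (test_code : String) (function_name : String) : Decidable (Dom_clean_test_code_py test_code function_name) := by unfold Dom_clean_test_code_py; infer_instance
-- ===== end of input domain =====

-- B replaces A's boolean in_test_func flag and single pass by an outer dispatch loop with an
-- inner body-consuming loop (index-driven in Python, mutual recursion here): objective 'alternative'.

def pvSplitNL (s : String) : List String :=
  (PySem.Chars.splitOn s.toList "\n".toList).map String.ofList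

-- ===== PORT A =====
-- one iteration of A's for-loop: state = (clean, in_test_func)
def cleanA_step (st : List String × Bool) (line : String) : List String × Bool :=
  let stripped := PySem.Str.strip line
  if PySem.Str.startswith stripped "import " || PySem.Str.startswith stripped "from " then
    (st.1 ++ [line], false)
  else if PySem.Str.startswith stripped "def test_" then
    (st.1 ++ [line], true)
  else if st.2 then
    (if stripped == "" || PySem.Str.startswith line " " || PySem.Str.startswith line "\t" then
      (st.1 ++ [line], true)
    else
      -- in_test_func = False; then A re-checks 'def test_' (unreachable here, ported literally)
      if PySem.Str.startswith stripped "def test_" then (st.1 ++ [line], true)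
      else (st.1, false))
  else if stripped == "" then (st.1 ++ [line], st.2)
  else st

def clean_test_code_py (test_code : String) (function_name : String) : String :=
  let lines := pvSplitNL test_code
  let res := lines.foldl cleanA_step ([], false)
  PySem.Str.strip (PySem.Str.join "\n" res.1)

-- ===== PORT B =====
-- outer loop of Source B / inner while loop of Source B: the inner loop re-dispatches to the outer loop
-- on the first line it does not consume
mutual
def cleanB_outer (l : List String) : List String :=
  match l with
  | [] => []
  | line :: ls =>
    let stripped := PySem.Str.strip line
    if PySem.Str.startswith stripped "import " || PySem.Str.startswith stripped "from " then
      line :: cleanB_outer ls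
    else if PySem.Str.startswith stripped "def test_" then
      line :: cleanB_inner ls
    else if stripped == "" then
      line :: cleanB_outer ls
    else
      cleanB_outer ls
termination_by (l.length, 0)
def cleanB_inner (l : List String) : List String :=
  match l with
  | [] => []
  | line :: ls =>
    let stripped := PySem.Str.strip line
    if PySem.Str.startswith stripped "import " || PySem.Str.startswith stripped "from " then
      cleanB_outer (line :: ls)
    else if stripped == "" || PySem.Str.startswith line " " || PySem.Str.startswith line "\t" then
      line :: cleanB_inner ls
    else
      cleanB_outer (line :: ls)
termination_by (l.length, 1)
end

def clean_test_code_py_alt (test_code : String) (function_name : String) : String :=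
  PySem.Str.strip (PySem.Str.join "\n" (cleanB_outer (pvSplitNL test_code)))

-- ===== PRECONDITION & SPEC =====
def Spec_clean_test_code_py (test_code : String) (function_name : String) (out : String) : Prop := out = clean_test_code_py_alt test_code function_name
instance (test_code : String) (function_name : String) (out : String) : Decidable (Spec_clean_test_code_py test_code function_name out) := by unfold Spec_clean_test_code_py; infer_instance

-- ===== CLAIM (what is proved, stated in full; the proofs are below) =====
def Claim_equal_clean_test_code_py : Prop := ∀ (test_code : String) (function_name : String), Dom_clean_test_code_py test_code function_name → Spec_clean_test_code_py test_code function_name (clean_test_code_py test_code function_name)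

-- ===== LEMMAS AND PROOFS =====

-- A's fold from flag=false collects exactly cleanB_outer, and from flag=true exactly cleanB_inner
theorem cleanA_foldl_eq (ls : List String) : ∀ acc : List String,
    (ls.foldl cleanA_step (acc, false)).1 = acc ++ cleanB_outer ls ∧
    (ls.foldl cleanA_step (acc, true)).1 = acc ++ cleanB_inner ls := by
  induction ls with
  | nil => intro acc; simp [cleanB_outer, cleanB_inner]
  | cons line ls ih =>
    intro acc
    have ih1 : ∀ a, (ls.foldl cleanA_step (a, false)).1 = a ++ cleanB_outer ls :=
      fun a => (ih a).1
    have ih2 : ∀ a, (ls.foldl cleanA_step (a, true)).1 = a ++ cleanB_inner ls :=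
      fun a => (ih a).2
    constructor
    · simp only [List.foldl_cons, cleanA_step, cleanB_outer]
      split_ifs <;> simp_all [cleanB_inner, ih1, ih2]
    · simp only [List.foldl_cons, cleanA_step, cleanB_inner]
      split_ifs <;> simp_all [cleanB_outer, ih1, ih2]

-- ===== VERDICT (by name: the statement is the Claim_ definition above) =====
theorem clean_test_code_py_spec : Claim_equal_clean_test_code_py := by
  intro test_code function_name _
  unfold Spec_clean_test_code_py clean_test_code_py clean_test_code_py_alt
  simp [(cleanA_foldl_eq (pvSplitNL test_code) []).1]
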